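-- pv_equiv track=rewrite | github.com/anmolgupta824/ai-native-vibe-check | vibe_check/interview.py | filter_personas
-- ===== SOURCE A (Python) =====
-- def filter_personas(
--     responses: list[dict],
--     filter_action: str | None = None,
--     segment: str | None = None,
--     post_file: str | None = None,
-- ) -> list[dict]:
--     """Filter persona responses based on criteria.
--
--     Args:
--         responses: List of persona response dicts
--         filter_action: Filter by action (e.g., 'scroll_past', 'share')
--         segment: Filter by segment/role
--         post_file: Filter by specific post
--     """
--     filtered = responses
--
--     if post_file:
--         filtered = [r for r in filtered if r.get("post_file") == post_file]
--
--     if filter_action: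
--         filtered = [r for r in filtered if r.get("action") == filter_action]
--
--     if segment:
--         segment_lower = segment.lower()
--         filtered = [r for r in filtered if segment_lower in r.get("segment", "").lower()]
--
--     return filtered
-- ===== SOURCE B (Python) =====
-- def filter_personas(
--     responses: list[dict],
--     filter_action: str | None = None,
--     segment: str | None = None,
--     post_file: str | None = None,
-- ) -> list[dict]:
--     """Compile the active criteria into a small filter plan, then run the plan
--     once over the responses with an explicit loop."""
--     plan = []
--     if post_file:
--         plan.append(("eq", "post_file", post_file))
--     if filter_action:
--         plan.append(("eq", "action", filter_action))
--     if segment: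
--         plan.append(("sub", "segment", segment.lower()))
--
--     def matches(r, check):
--         kind, key, val = check
--         if kind == "eq":
--             return r.get(key) == val
--         return val in r.get(key, "").lower()
--
--     out = []
--     for r in responses:
--         if all(matches(r, c) for c in plan):
--             out.append(r)
--     return out
-- ===== Notes on version B (the rewrite author's own statement) =====
-- stated objective: alternative
-- what changed: A runs up to three staged list comprehensions, one per active criterion; B first compiles the active criteria into a data-driven filter plan (a list of (kind,key,value) checks) and then interprets that plan in one explicit accumulator loop over the responses.
import Mathlib
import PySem

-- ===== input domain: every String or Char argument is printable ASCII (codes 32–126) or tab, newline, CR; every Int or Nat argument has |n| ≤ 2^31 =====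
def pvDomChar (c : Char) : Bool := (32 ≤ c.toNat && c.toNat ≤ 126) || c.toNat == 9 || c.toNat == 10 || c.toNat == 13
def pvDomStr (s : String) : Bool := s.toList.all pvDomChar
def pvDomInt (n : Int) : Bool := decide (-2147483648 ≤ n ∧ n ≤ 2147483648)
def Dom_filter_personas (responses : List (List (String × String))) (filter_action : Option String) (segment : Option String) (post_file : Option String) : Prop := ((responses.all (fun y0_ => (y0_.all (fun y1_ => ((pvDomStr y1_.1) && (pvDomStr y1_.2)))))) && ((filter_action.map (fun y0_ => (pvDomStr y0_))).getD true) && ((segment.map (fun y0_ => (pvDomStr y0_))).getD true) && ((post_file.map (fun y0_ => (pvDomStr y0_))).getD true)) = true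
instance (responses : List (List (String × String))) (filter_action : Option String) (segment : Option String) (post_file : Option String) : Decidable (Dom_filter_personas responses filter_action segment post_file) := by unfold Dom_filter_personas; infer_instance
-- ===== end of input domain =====

-- B compiles the active criteria into a data-driven filter plan and interprets it in one
-- explicit loop, instead of A's up-to-three staged filtering passes (objective: alternative).
-- Equivalence is about the RETURN value; Python A may return the original list object
-- when no filter is active, B always builds a new list.

-- ===== PORT A =====
def filter_personas (responses : List (List (String × String))) (filter_action : Option String) (segment : Option String) (post_file : Option String) : List (List (String × String)) :=
  let filtered := responses
  -- if post_file:
  let filtered := match post_file with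
    | some p => if p == "" then filtered
        else filtered.filter (fun r => (PySem.Dict.mk r).get? "post_file" == some p)
    | none => filtered
  -- if filter_action:
  let filtered := match filter_action with
    | some a => if a == "" then filtered
        else filtered.filter (fun r => (PySem.Dict.mk r).get? "action" == some a)
    | none => filtered
  -- if segment:
  let filtered := match segment with
    | some s => if s == "" then filtered
        else
          let segment_lower := PySem.Str.lower s
          filtered.filter (fun r =>
            PySem.Str.isIn segment_lower (PySem.Str.lower ((PySem.Dict.mk r).getD "segment" "")))
    | none => filtered
  filtered

-- ===== PORT B =====
-- a check of Source B's plan: ("eq", key, val) or ("sub", key, val)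
inductive PvCheck
  | eq : String → String → PvCheck
  | sub : String → String → PvCheck
deriving DecidableEq, Repr

-- the plan-building prologue of Source B (three truthiness-guarded appends)
def pvPlan (filter_action : Option String) (segment : Option String) (post_file : Option String) : List PvCheck :=
  let plan : List PvCheck := []
  let plan := match post_file with
    | some p => if p == "" then plan else plan ++ [.eq "post_file" p]
    | none => plan
  let plan := match filter_action with
    | some a => if a == "" then plan else plan ++ [.eq "action" a]
    | none => plan
  let plan := match segment with
    | some s => if s == "" then plan else plan ++ [.sub "segment" (PySem.Str.lower s)]
    | none => plan
  plan

-- def matches(r, check) of Source B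
def pvMatches (r : List (String × String)) : PvCheck → Bool
  | .eq key val => (PySem.Dict.mk r).get? key == some val
  | .sub key val => PySem.Str.isIn val (PySem.Str.lower ((PySem.Dict.mk r).getD key ""))

-- the explicit accumulator loop of Source B (out.append ↔ cons + recurse)
def pvRun (plan : List PvCheck) : List (List (String × String)) → List (List (String × String))
  | [] => []
  | r :: rest => if plan.all (pvMatches r) then r :: pvRun plan rest else pvRun plan rest

def filter_personas_alt (responses : List (List (String × String))) (filter_action : Option String) (segment : Option String) (post_file : Option String) : List (List (String × String)) :=
  pvRun (pvPlan filter_action segment post_file) responses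

-- ===== PRECONDITION & SPEC =====
def Spec_filter_personas (responses : List (List (String × String))) (filter_action : Option String) (segment : Option String) (post_file : Option String) (out : List (List (String × String))) : Prop := out = filter_personas_alt responses filter_action segment post_file
instance (responses : List (List (String × String))) (filter_action : Option String) (segment : Option String) (post_file : Option String) (out : List (List (String × String))) : Decidable (Spec_filter_personas responses filter_action segment post_file out) := by unfold Spec_filter_personas; infer_instance

-- ===== CLAIM (what is proved, stated in full; the proofs are below) =====
def Claim_equal_filter_personas : Prop := ∀ (responses : List (List (String × String))) (filter_action : Option String) (segment : Option String) (post_file : Option String), Dom_filter_personas responses filter_action segment post_file → Spec_filter_personas responses filter_action segment post_file (filter_personas responses filter_action segment post_file)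

-- ===== LEMMAS AND PROOFS =====
theorem pvRun_eq_filter (plan : List PvCheck) (l : List (List (String × String))) :
    pvRun plan l = l.filter (fun r => plan.all (pvMatches r)) := by
  induction l with
  | nil => rfl
  | cons r rest ih =>
      simp only [pvRun, List.filter, ih]
      by_cases h : plan.all (pvMatches r) = true <;> simp [h]

theorem pvMain (responses : List (List (String × String))) (filter_action : Option String) (segment : Option String) (post_file : Option String) :
    filter_personas responses filter_action segment post_file
      = filter_personas_alt responses filter_action segment post_file := by
  unfold filter_personas filter_personas_alt pvPlan
  rw [pvRun_eq_filter]
  cases post_file <;> cases filter_action <;> cases segment <;>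
    simp only [] <;> (try split_ifs) <;>
    simp_all [List.filter_filter, pvMatches, List.all] <;>
    (refine List.filter_congr fun a _ => ?_) <;>
    simp_all [Bool.and_comm, Bool.and_left_comm, Bool.and_assoc]

-- ===== VERDICT (by name: the statement is the Claim_ definition above) =====
theorem filter_personas_spec : Claim_equal_filter_personas := by
  intro responses fa seg pf _
  unfold Spec_filter_personas
  exact pvMain responses fa seg pf
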